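-- pv_equiv track=rewrite | github.com/Amagnum/hunter | Analysing_Search_Mechanism/intersect.py | markMatch
-- ===== SOURCE A (Python) =====
-- def markMatch(X, com):
--     comLen = len(com)
--     m = len(X)
--     colored1 = []
--     j=0
--     for i in range(m):
--       if j<comLen and X[i][:-1] == com[j]:
--         colored1.append(i)
--         j+=1
--     return colored1
-- ===== SOURCE B (Python) =====
-- def markMatch(X, com):
--     # Stage 1: index every position of X by its sliced key.
--     pos = {}
--     for i, x in enumerate(X):
--         key = x[:-1]
--         pos[key] = pos.get(key, []) + [i]
--     # Stage 2: consume com against the per-key position queues.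
--     out = []
--     last = -1
--     for c in com:
--         ps = pos.get(c, [])
--         while ps and ps[0] <= last:
--             ps = ps[1:]
--         if not ps:
--             break
--         last = ps[0]
--         out.append(last)
--         pos[c] = ps[1:]
--     return out
-- ===== Notes on version B (the rewrite author's own statement) =====
-- stated objective: alternative
-- what changed: Two-stage algorithm: B first builds a dict indexing each sliced key x[:-1] to the list of its positions in X, then matches com greedily by consuming the per-key position queues past a last-matched cursor, instead of A's single synchronized scan of X with a pointer into com.
import Mathlib
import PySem

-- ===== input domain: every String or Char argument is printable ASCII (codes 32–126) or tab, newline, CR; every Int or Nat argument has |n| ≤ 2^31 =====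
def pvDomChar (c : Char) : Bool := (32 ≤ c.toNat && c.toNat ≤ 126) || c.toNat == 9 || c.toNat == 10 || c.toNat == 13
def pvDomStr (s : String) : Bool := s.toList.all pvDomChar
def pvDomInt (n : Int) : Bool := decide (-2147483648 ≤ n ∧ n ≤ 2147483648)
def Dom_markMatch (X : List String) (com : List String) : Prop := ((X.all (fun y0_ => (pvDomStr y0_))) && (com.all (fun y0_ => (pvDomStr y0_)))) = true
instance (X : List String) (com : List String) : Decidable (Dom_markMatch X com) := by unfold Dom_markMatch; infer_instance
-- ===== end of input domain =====

-- B replaces A's single synchronized scan by two stages: build a dict indexing each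
-- sliced key to its list of positions, then match com greedily against the per-key
-- position queues (alternative algorithm; same result, not faster).

-- ===== PORT A =====
-- literal transliteration: for i in range(m): if j<comLen and X[i][:-1]==com[j]: append i; j+=1
-- (X[i] / com[j] ported as pyGetD with default "": both indices are in range whenever read)
def markMatch (X : List String) (com : List String) : List Int :=
  let comLen : Int := PySem.List.len com
  let m : Int := PySem.List.len X
  let st :=
    (PySem.List.pyRange 0 m 1).foldl
      (fun (s : List Int × Int) i =>
        if s.2 < comLen ∧
            PySem.Str.slice (PySem.List.pyGetD X i "") none (some (-1)) =
              PySem.List.pyGetD com s.2 "" then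
          (s.1 ++ [i], s.2 + 1)
        else s)
      ([], 0)
  st.1

-- ===== PORT B =====
-- stage 1: pos = {}; for i, x in enumerate(X): key = x[:-1]; pos[key] = pos.get(key, []) + [i]
def pvBuildPos (X : List String) : PySem.Dict String (List Int) :=
  (PySem.List.enumerate X 0).foldl
    (fun d p => d.modify (PySem.Str.slice p.2 none (some (-1))) [] (· ++ [p.1]))
    PySem.Dict.empty

-- while ps and ps[0] <= last: ps = ps[1:]
def pvDropLE (last : Int) : List Int → List Int
  | [] => []
  | i :: rest => if i ≤ last then pvDropLE last rest else i :: rest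

-- stage 2: for c in com: ps = pos.get(c, []); drop <= last; break if empty; take head
def pvBGo : List String → PySem.Dict String (List Int) → Int → List Int
  | [], _, _ => []
  | c :: cs, pos, last =>
    match pvDropLE last (pos.getD c []) with
    | [] => []
    | i :: rest => i :: pvBGo cs (pos.insert c rest) i

def markMatch_alt (X : List String) (com : List String) : List Int :=
  pvBGo com (pvBuildPos X) (-1)

-- ===== PRECONDITION & SPEC =====
def Spec_markMatch (X : List String) (com : List String) (out : List Int) : Prop := out = markMatch_alt X com
instance (X : List String) (com : List String) (out : List Int) : Decidable (Spec_markMatch X com out) := by unfold Spec_markMatch; infer_instance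

-- ===== CLAIM (what is proved, stated in full; the proofs are below) =====
def Claim_equal_markMatch : Prop := ∀ (X : List String) (com : List String), Dom_markMatch X com → Spec_markMatch X com (markMatch X com)

-- ===== LEMMAS AND PROOFS =====

-- the keyed position list both sides are proved against
def pvKeyed (X : List String) : List (String × Int) :=
  (PySem.List.enumerate X 0).map
    (fun p => (PySem.Str.slice p.2 none (some (-1)), p.1))

-- the common greedy specification: for each c, the first position of key c past last
def pvGreedy (l : List (String × Int)) : List String → Int → List Int
  | [], _ => []
  | c :: cs, last =>
    match (l.filter (fun p => decide (last < p.2))).find? (fun p => p.1 == c) with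
    | none => []
    | some p => p.2 :: pvGreedy l cs p.2

-- A as structural recursion over the keyed pairs with pointer j into com
def pvARec (com : List String) : List (String × Int) → Int → List Int
  | [], _ => []
  | (k, i) :: rest, j =>
    if j < (PySem.List.len com) ∧ k = PySem.List.pyGetD com j "" then
      i :: pvARec com rest (j + 1)
    else pvARec com rest j

-- A's scan-consume form (intermediate between pvARec and pvGreedy)
def pvAltScan (c : String) : List (String × Int) → Option (Int × List (String × Int))
  | [] => none
  | (k, i) :: rest => if k = c then some (i, rest) else pvAltScan c rest

def pvAltGo : List String → List (String × Int) → List Int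
  | [], _ => []
  | c :: cs, pairs =>
    match pvAltScan c pairs with
    | none => []
    | some (i, rest) => i :: pvAltGo cs rest

theorem pvFoldl_eq_pvARec (com : List String) (pairs : List (String × Int))
    (st : List Int × Int) :
    (pairs.foldl
      (fun (s : List Int × Int) (p : String × Int) =>
        if s.2 < PySem.List.len com ∧ p.1 = PySem.List.pyGetD com s.2 "" then
          (s.1 ++ [p.2], s.2 + 1)
        else s)
      st).1 = st.1 ++ pvARec com pairs st.2 := by
  induction pairs generalizing st with
  | nil => simp [pvARec]
  | cons p rest ih =>
    obtain ⟨k, i⟩ := p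
    rw [List.foldl_cons, ih]
    by_cases h : st.2 < PySem.List.len com ∧ k = PySem.List.pyGetD com st.2 ""
    · simp only [pvARec, if_pos h]
      simp
    · simp only [pvARec, if_neg h]

theorem pvARec_nil_of_ge (com : List String) (pairs : List (String × Int)) (j : Int)
    (h : (com.length : Int) ≤ j) : pvARec com pairs j = [] := by
  induction pairs generalizing j with
  | nil => rfl
  | cons p rest ih =>
    obtain ⟨k, i⟩ := p
    have hc : ¬ (j < PySem.List.len com ∧ k = PySem.List.pyGetD com j "") := by
      rintro ⟨hj, -⟩
      simp only [PySem.List.len] at hj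
      omega
    simp only [pvARec, if_neg hc]
    exact ih j h

theorem pvAltGo_nil (cs : List String) : pvAltGo cs [] = [] := by
  cases cs <;> rfl

theorem pvARec_eq_pvAltGo (com : List String) (pairs : List (String × Int)) (j : Nat) :
    pvARec com pairs (j : Int) = pvAltGo (com.drop j) pairs := by
  induction pairs generalizing j with
  | nil => rw [pvAltGo_nil]; rfl
  | cons p rest ih =>
    obtain ⟨k, i⟩ := p
    by_cases hj : j < com.length
    · have hdrop : com.drop j = com[j] :: com.drop (j + 1) :=
        (List.getElem_cons_drop hj).symm
      have hget : PySem.List.pyGetD com (j : Int) "" = com[j] := by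
        rw [PySem.List.pyGetD_natCast]
        simp [hj]
      by_cases hx : k = com[j]
      · have hcond : ((j : Int) < PySem.List.len com ∧
            k = PySem.List.pyGetD com (j : Int) "") := by
          constructor
          · simp only [PySem.List.len]
            exact_mod_cast hj
          · rw [hget]; exact hx
        have hc1 : ((j : Int) + 1) = ((j + 1 : Nat) : Int) := by push_cast; ring
        simp only [pvARec, if_pos hcond]
        rw [hdrop]
        simp only [pvAltGo, pvAltScan, if_pos hx]
        rw [hc1, ih]
      · have hcond : ¬ ((j : Int) < PySem.List.len com ∧
            k = PySem.List.pyGetD com (j : Int) "") := by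
          rintro ⟨-, h⟩
          rw [hget] at h
          exact hx h
        simp only [pvARec, if_neg hcond]
        rw [ih j, hdrop]
        simp only [pvAltGo, pvAltScan, if_neg hx]
    · have hcond : ¬ ((j : Int) < PySem.List.len com ∧
          k = PySem.List.pyGetD com (j : Int) "") := by
        rintro ⟨h, -⟩
        simp only [PySem.List.len] at h
        omega
      simp only [pvARec, if_neg hcond]
      rw [List.drop_eq_nil_of_le (by omega),
        pvARec_nil_of_ge com rest j (by exact_mod_cast Nat.le_of_not_lt hj)]
      rfl

-- find? = head of filter
theorem pvFind?_eq_head?_filter {α : Type} (p : α → Bool) (l : List α) :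
    l.find? p = (l.filter p).head? := by
  induction l with
  | nil => rfl
  | cons a t ih =>
    cases h : p a with
    | true => simp only [List.find?_cons, List.filter_cons, h]; rfl
    | false =>
      simp only [List.find?_cons, h, List.filter_cons, Bool.false_eq_true, if_false]
      exact ih

-- scanning the suffix past `last` of a snd-sorted list finds the greedy match,
-- and the remaining iterator is exactly the suffix past the match
theorem pvAltScan_filter (c : String) (l : List (String × Int)) (last : Int)
    (hs : l.Pairwise (fun p q => p.2 < q.2)) :
    pvAltScan c (l.filter (fun p => decide (last < p.2))) =
      ((l.filter (fun p => decide (last < p.2))).find? (fun p => p.1 == c)).map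
        (fun p => (p.2, l.filter (fun q => decide (p.2 < q.2)))) := by
  induction l with
  | nil => rfl
  | cons a t ih =>
    obtain ⟨k, i⟩ := a
    have hs' : t.Pairwise (fun p q => p.2 < q.2) := hs.tail
    have hlt : ∀ q ∈ t, i < q.2 := fun q hq => List.rel_of_pairwise_cons hs hq
    by_cases hl : last < i
    · have hfc : ((k, i) :: t).filter (fun p => decide (last < p.2)) =
          (k, i) :: t.filter (fun p => decide (last < p.2)) := by
        simp [hl]
      rw [hfc]
      by_cases hk : k = c
      · have hbeq : ((((k, i) : String × Int)).1 == c) = true := by simpa using hk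
        have e1 : t.filter (fun p => decide (last < p.2)) = t :=
          List.filter_eq_self.2 (fun q hq => by have := hlt q hq; simp; omega)
        have e2 : t.filter (fun q => decide (i < q.2)) = t :=
          List.filter_eq_self.2 (fun q hq => by have := hlt q hq; simpa using this)
        simp only [pvAltScan, if_pos hk, List.find?_cons, hbeq, Option.map_some]
        rw [e1]
        congr 1
        rw [List.filter_cons]
        simp only [decide_eq_true_eq]
        rw [if_neg (by simp), e2]
      · have hbeq : ((((k, i) : String × Int)).1 == c) = false := by simpa using hk
        simp only [pvAltScan, if_neg hk, List.find?_cons, hbeq]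
        rw [ih hs']
        cases hfind : (t.filter (fun p => decide (last < p.2))).find? (fun p => p.1 == c) with
        | none => rfl
        | some p =>
          have hpt : p ∈ t := List.mem_of_mem_filter (List.mem_of_find?_eq_some hfind)
          have hip : i < p.2 := hlt p hpt
          simp only [Option.map_some]
          congr 2
          rw [List.filter_cons]
          simp only [decide_eq_true_eq]
          rw [if_neg (by omega)]
    · have hfc : ((k, i) :: t).filter (fun p => decide (last < p.2)) =
          t.filter (fun p => decide (last < p.2)) := by
        simp [hl]
      rw [hfc, ih hs']
      cases hfind : (t.filter (fun p => decide (last < p.2))).find? (fun p => p.1 == c) with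
      | none => rfl
      | some p =>
        have hlast : last < p.2 := by
          have := List.of_mem_filter (List.mem_of_find?_eq_some hfind)
          simpa using this
        simp only [Option.map_some]
        congr 2
        rw [List.filter_cons]
        simp only [decide_eq_true_eq]
        rw [if_neg (by omega)]

theorem pvAltGo_eq_pvGreedy (l : List (String × Int))
    (hs : l.Pairwise (fun p q => p.2 < q.2)) (cs : List String) (last : Int) :
    pvAltGo cs (l.filter (fun p => decide (last < p.2))) = pvGreedy l cs last := by
  induction cs generalizing last with
  | nil => rfl
  | cons c cs ih =>
    simp only [pvAltGo, pvGreedy]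
    rw [pvAltScan_filter c l last hs]
    cases hfind : (l.filter (fun p => decide (last < p.2))).find? (fun p => p.1 == c) with
    | none => rfl
    | some p =>
      simp only [Option.map_some]
      rw [ih p.2]

-- B-side helpers -------------------------------------------------------------

theorem pvDropLE_eq_filter (t : Int) (ps : List Int) (hs : ps.Pairwise (· < ·)) :
    pvDropLE t ps = ps.filter (fun i => decide (t < i)) := by
  induction ps with
  | nil => rfl
  | cons i rest ih =>
    have hlt : ∀ q ∈ rest, i < q := fun q hq => List.rel_of_pairwise_cons hs hq
    by_cases h : i ≤ t
    · simp only [pvDropLE, if_pos h, List.filter_cons]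
      rw [if_neg (by simp; omega), ih hs.tail]
    · simp only [pvDropLE, if_neg h, List.filter_cons]
      rw [if_pos (by simp; omega)]
      congr 1
      rw [List.filter_eq_self.2]
      intro q hq
      have := hlt q hq
      simp; omega

-- per-key positions of a keyed list
def pvM (l : List (String × Int)) (c : String) : List Int :=
  (l.filter (fun p => p.1 == c)).map (·.2)

theorem pvM_pairwise (l : List (String × Int))
    (hs : l.Pairwise (fun p q => p.2 < q.2)) (c : String) :
    (pvM l c).Pairwise (· < ·) :=
  (hs.filter _).map _ (fun _ _ h => h)

theorem pvM_filter_eq (l : List (String × Int)) (c : String) (last : Int) :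
    (pvM l c).filter (fun i => decide (last < i)) =
      ((l.filter (fun p => decide (last < p.2))).filter (fun p => p.1 == c)).map (·.2) := by
  simp only [pvM, List.filter_map]
  rw [List.filter_comm]
  rfl

-- the invariant run: B's queue loop computes the greedy spec
theorem pvBGo_eq_pvGreedy (l : List (String × Int))
    (hs : l.Pairwise (fun p q => p.2 < q.2)) (cs : List String)
    (pos : PySem.Dict String (List Int)) (last : Int)
    (H : ∀ c, (pos.getD c []).Pairwise (· < ·) ∧
      (pos.getD c []).filter (fun i => decide (last < i)) =
        (pvM l c).filter (fun i => decide (last < i))) :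
    pvBGo cs pos last = pvGreedy l cs last := by
  induction cs generalizing pos last with
  | nil => rfl
  | cons c cs ih =>
    obtain ⟨hp, hf⟩ := H c
    have hdrop : pvDropLE last (pos.getD c []) =
        ((l.filter (fun p => decide (last < p.2))).filter (fun p => p.1 == c)).map (·.2) := by
      rw [pvDropLE_eq_filter last _ hp, hf, pvM_filter_eq]
    simp only [pvBGo, pvGreedy]
    rw [pvFind?_eq_head?_filter]
    cases hF : (l.filter (fun p => decide (last < p.2))).filter (fun p => p.1 == c) with
    | nil =>
      rw [hdrop, hF]
      rfl
    | cons p F' =>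
      rw [hdrop, hF]
      simp only [List.map_cons, List.head?_cons]
      have hMsorted : ((pvM l c).filter (fun i => decide (last < i))).Pairwise (· < ·) :=
        (pvM_pairwise l hs c).filter _
      have hMeq : (pvM l c).filter (fun i => decide (last < i)) = p.2 :: F'.map (·.2) := by
        rw [pvM_filter_eq, hF]; rfl
      have hrest : ∀ q ∈ F'.map (·.2), p.2 < q := by
        rw [hMeq] at hMsorted
        exact fun q hq => List.rel_of_pairwise_cons hMsorted hq
      have hlastp : last < p.2 := by
        have hmem : p ∈ l.filter (fun p => decide (last < p.2)) :=
          List.mem_of_mem_filter (hF ▸ List.mem_cons_self)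
        have := List.of_mem_filter hmem
        simpa using this
      -- refiltering past the larger threshold p.2 ignores the old threshold last
      have key : ∀ (m : List Int),
          (m.filter (fun i => decide (last < i))).filter (fun i => decide (p.2 < i)) =
            m.filter (fun i => decide (p.2 < i)) := by
        intro m
        rw [List.filter_filter]
        apply List.filter_congr
        intro i _
        by_cases h : p.2 < i
        · have h2 : last < i := by omega
          simp [h, h2]
        · simp [h]
      congr 1
      apply ih
      intro c'
      by_cases hc : c' = c
      · subst hc
        have hsorted' : (p.2 :: F'.map (·.2)).Pairwise (· < ·) := hMeq ▸ hMsorted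
        constructor
        · simpa [PySem.Dict.getD_insert] using hsorted'.tail
        · rw [PySem.Dict.getD_insert, if_pos rfl]
          rw [List.filter_eq_self.2 (fun q hq => by
            have := hrest q hq; simp; omega)]
          rw [← key (pvM l c'), hMeq, List.filter_cons]
          simp only [decide_eq_true_eq]
          rw [if_neg (by simp)]
          rw [List.filter_eq_self.2 (fun q hq => by
            have := hrest q hq; simp; omega)]
      · obtain ⟨hp', hf'⟩ := H c'
        constructor
        · simpa [PySem.Dict.getD_insert, hc] using hp'
        · rw [PySem.Dict.getD_insert, if_neg hc]
          rw [← key (pos.getD c' []), hf', key]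

-- properties of the keyed list
theorem pvKeyed_pairwise (X : List String) :
    (pvKeyed X).Pairwise (fun p q => p.2 < q.2) := by
  exact (PySem.List.pairwise_lt_enumerate X 0).map _ (fun _ _ h => h)

theorem pvKeyed_nonneg (X : List String) : ∀ p ∈ pvKeyed X, 0 ≤ p.2 := by
  intro p hp
  simp only [pvKeyed, List.mem_map] at hp
  obtain ⟨q, hq, rfl⟩ := hp
  rw [PySem.List.mem_enumerate_iff] at hq
  obtain ⟨k, hk, rfl⟩ := hq
  simp

theorem pvKeyed_filter_neg_one (X : List String) :
    (pvKeyed X).filter (fun p => decide (-1 < p.2)) = pvKeyed X := by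
  rw [List.filter_eq_self.2]
  intro p hp
  have := pvKeyed_nonneg X p hp
  simp; omega

-- A equals the greedy spec
theorem markMatch_eq_greedy (X com : List String) :
    markMatch X com = pvGreedy (pvKeyed X) com (-1) := by
  have h2 : markMatch X com =
      ((pvKeyed X).foldl
        (fun (s : List Int × Int) (p : String × Int) =>
          if s.2 < PySem.List.len com ∧ p.1 = PySem.List.pyGetD com s.2 "" then
            (s.1 ++ [p.2], s.2 + 1)
          else s) ([], 0)).1 := by
    simp only [markMatch, pvKeyed]
    rw [PySem.List.enumerate_eq_map_pyRange (d := ""), List.map_map, List.foldl_map]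
    rfl
  rw [h2, pvFoldl_eq_pvARec com (pvKeyed X) ([], 0)]
  have h3 := pvARec_eq_pvAltGo com (pvKeyed X) 0
  simp only [Nat.cast_zero, List.drop_zero] at h3
  rw [List.nil_append, h3, ← pvAltGo_eq_pvGreedy (pvKeyed X) (pvKeyed_pairwise X) com (-1),
    pvKeyed_filter_neg_one]

-- B's built dict is the per-key position index
theorem pvBuildPos_getD (X : List String) (c : String) :
    (pvBuildPos X).getD c [] = pvM (pvKeyed X) c := by
  have : pvBuildPos X =
      (pvKeyed X).foldl (fun d p => d.modify p.1 [] (· ++ [p.2])) PySem.Dict.empty := by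
    simp only [pvBuildPos, pvKeyed, List.foldl_map]
  rw [this, PySem.Dict.getD_foldl_modify_append]
  simp [pvM]

-- B equals the greedy spec
theorem markMatch_alt_eq_greedy (X com : List String) :
    markMatch_alt X com = pvGreedy (pvKeyed X) com (-1) := by
  apply pvBGo_eq_pvGreedy (pvKeyed X) (pvKeyed_pairwise X)
  intro c
  rw [pvBuildPos_getD]
  exact ⟨pvM_pairwise (pvKeyed X) (pvKeyed_pairwise X) c, rfl⟩

-- ===== VERDICT =====
theorem markMatch_spec : Claim_equal_markMatch := by
  intro X com _
  unfold Spec_markMatch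
  rw [markMatch_eq_greedy, markMatch_alt_eq_greedy]
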